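-- pv_equiv track=rewrite | github.com/Tonyzhou98/rllm | examples/deepresearch/deepresearch_agent.py | _prune_failed_tool_turns
-- ===== SOURCE A (Python) =====
-- def _prune_failed_tool_turns(messages: list[dict]) -> list[dict]:
--     """
--     Remove assistant/tool-response pairs where the tool failed (error in tool output)
--     to reclaim context without losing successful steps.
--     """
--     if len(messages) <= 2:
--         return messages
--
--     pruned = messages[:2]  # preserve system + original user prompt
--     i = 2
--     while i < len(messages):
--         msg = messages[i]
--
--         # ReAct text format: assistant tool_call followed by user tool_response
--         if (
--             isinstance(msg, dict)
--             and msg.get("role") == "assistant"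
--             and "<tool_call>" in msg.get("content", "")
--             and i + 1 < len(messages)
--             and isinstance(messages[i + 1], dict)
--             and messages[i + 1].get("role") == "user"
--             and "<tool_response>" in messages[i + 1].get("content", "")
--         ):
--             tool_resp = messages[i + 1].get("content", "")
--             if "error" in tool_resp.lower():
--                 i += 2
--                 continue  # drop failed turn
--             pruned.extend([msg, messages[i + 1]])
--             i += 2
--             continue
--
--         # Native function calling: assistant with tool_calls followed by tool role response(s)
--         if (
--             isinstance(msg, dict)
--             and msg.get("role") == "assistant"
--             and msg.get("tool_calls")
--             and i + 1 < len(messages)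
--             and isinstance(messages[i + 1], dict)
--             and messages[i + 1].get("role") == "tool"
--         ):
--             tool_resp = messages[i + 1].get("content", "")
--             if "error" in str(tool_resp).lower():
--                 i += 2
--                 continue  # drop failed turn
--             pruned.extend([msg, messages[i + 1]])
--             i += 2
--             continue
--
--         pruned.append(msg)
--         i += 1
--
--     return pruned
-- ===== SOURCE B (Python) =====
-- def _is_failed_pair(msg, nxt):
--     return (
--         msg.get("role") == "assistant"
--         and (
--             ("<tool_call>" in msg.get("content", "")
--              and nxt.get("role") == "user"
--              and "<tool_response>" in nxt.get("content", ""))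
--             or (bool(msg.get("tool_calls")) and nxt.get("role") == "tool")
--         )
--         and "error" in str(nxt.get("content", "")).lower()
--     )
--
--
-- def _prune_failed_tool_turns(messages: list[dict]) -> list[dict]:
--     if len(messages) <= 2:
--         return messages
--     body = messages[2:]
--     drop = set()
--     for j, (msg, nxt) in enumerate(zip(body, body[1:])):
--         if _is_failed_pair(msg, nxt):
--             drop.add(j)
--             drop.add(j + 1)
--     return messages[:2] + [m for j, m in enumerate(body) if j not in drop]
-- ===== Notes on version B (the rewrite author's own statement) =====
-- stated objective: alternative
-- what changed: Replaces A's single stateful while-loop with variable stride (advance by 1 or 2, extending an accumulator) by a two-pass decomposition: a first scan over adjacent pairs builds a set of indices of failed assistant/tool turns, and a second pass keeps messages[:2] plus every later message whose index is not in the drop set; equivalent because a tool-response message (role 'user' or 'tool') can never itself start a pair.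
import Mathlib
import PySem

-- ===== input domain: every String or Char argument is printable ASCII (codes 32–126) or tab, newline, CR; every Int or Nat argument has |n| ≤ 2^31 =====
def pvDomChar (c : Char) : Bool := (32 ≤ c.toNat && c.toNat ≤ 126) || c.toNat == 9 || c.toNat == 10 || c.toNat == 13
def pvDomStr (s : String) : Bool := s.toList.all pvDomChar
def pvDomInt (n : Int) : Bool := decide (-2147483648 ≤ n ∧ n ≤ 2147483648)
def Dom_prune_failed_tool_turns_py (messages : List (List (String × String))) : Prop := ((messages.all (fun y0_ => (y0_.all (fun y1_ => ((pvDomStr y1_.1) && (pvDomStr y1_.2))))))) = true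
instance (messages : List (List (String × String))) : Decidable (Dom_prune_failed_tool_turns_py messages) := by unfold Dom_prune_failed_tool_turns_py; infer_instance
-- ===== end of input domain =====

-- B replaces A's stateful while-loop with variable stride by a two-pass decomposition
-- (mark failed-pair indices in a set, then filter by index); same cost, no speed claim.

-- shared message-field helpers (the same dict lookups both Pythons perform)
def pvRole (m : List (String × String)) : Option String := PySem.Dict.get? ⟨m⟩ "role"
def pvContent (m : List (String × String)) : String := PySem.Dict.getD ⟨m⟩ "content" ""
-- bool(msg.get("tool_calls")): present and a non-empty string
def pvToolCalls (m : List (String × String)) : Bool :=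
  match PySem.Dict.get? ⟨m⟩ "tool_calls" with
  | some s => !(s == "")
  | none => false
-- "error" in str(content).lower()  (str() is the identity: content is a string here)
def pvErr (m2 : List (String × String)) : Bool :=
  PySem.Str.isIn "error" (PySem.Str.lower (pvContent m2))

-- ===== PORT A =====
-- A's first if-condition (ReAct pair) and second if-condition (native pair)
def pvReact (m m2 : List (String × String)) : Bool :=
  (pvRole m == some "assistant") && PySem.Str.isIn "<tool_call>" (pvContent m) &&
  (pvRole m2 == some "user") && PySem.Str.isIn "<tool_response>" (pvContent m2)

def pvNative (m m2 : List (String × String)) : Bool :=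
  (pvRole m == some "assistant") && pvToolCalls m && (pvRole m2 == some "tool")

-- A's while-loop: i advances by 2 on a pair (checking i+1 < len via the two-cons
-- pattern), by 1 otherwise, extending the accumulator `pruned`
def pruneLoopA (pruned : List (List (String × String))) :
    List (List (String × String)) → List (List (String × String))
  | [] => pruned
  | [m] => pruned ++ [m]
  | m :: m2 :: rest =>
    if pvReact m m2 then
      if pvErr m2 then pruneLoopA pruned rest
      else pruneLoopA (pruned ++ [m, m2]) rest
    else if pvNative m m2 then
      if pvErr m2 then pruneLoopA pruned rest
      else pruneLoopA (pruned ++ [m, m2]) rest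
    else pruneLoopA (pruned ++ [m]) (m2 :: rest)

def prune_failed_tool_turns_py (messages : List (List (String × String))) : List (List (String × String)) :=
  if messages.length ≤ 2 then messages
  else pruneLoopA (messages.take 2) (messages.drop 2)

-- ===== PORT B =====
-- Source B's _is_failed_pair(msg, nxt)
def pvFailedPair (m m2 : List (String × String)) : Bool :=
  (pvRole m == some "assistant") &&
  ((PySem.Str.isIn "<tool_call>" (pvContent m) && (pvRole m2 == some "user") &&
      PySem.Str.isIn "<tool_response>" (pvContent m2)) ||
    (pvToolCalls m && (pvRole m2 == some "tool"))) &&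
  pvErr m2

-- first pass: for j, (msg, nxt) in enumerate(zip(body, body[1:])): collect drop indices
def pvDropSet (body : List (List (String × String))) : PySem.Set Int :=
  (PySem.List.enumerate (body.zip (body.drop 1))).foldl
    (fun d jp => if pvFailedPair jp.2.1 jp.2.2 then PySem.Set.add (PySem.Set.add d jp.1) (jp.1 + 1) else d)
    PySem.Set.empty

def prune_failed_tool_turns_py_alt (messages : List (List (String × String))) : List (List (String × String)) :=
  if messages.length ≤ 2 then messages
  else
    let body := messages.drop 2
    let d := pvDropSet body
    messages.take 2 ++ ((PySem.List.enumerate body).filter (fun jm => !(PySem.Set.contains d jm.1))).map (·.2)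

-- ===== PRECONDITION & SPEC =====
def Spec_prune_failed_tool_turns_py (messages : List (List (String × String))) (out : List (List (String × String))) : Prop := out = prune_failed_tool_turns_py_alt messages
instance (messages : List (List (String × String))) (out : List (List (String × String))) : Decidable (Spec_prune_failed_tool_turns_py messages out) := by unfold Spec_prune_failed_tool_turns_py; infer_instance

-- ===== CLAIM (what is proved, stated in full; the proofs are below) =====
def Claim_equal_prune_failed_tool_turns_py : Prop := ∀ (messages : List (List (String × String))), Dom_prune_failed_tool_turns_py messages → Spec_prune_failed_tool_turns_py messages (prune_failed_tool_turns_py messages)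

-- ===== LEMMAS AND PROOFS =====

-- common skeleton of both programs on the tail messages[2:]
def coreF : List (List (String × String)) → List (List (String × String))
  | [] => []
  | [m] => [m]
  | m :: m2 :: rest =>
    if pvReact m m2 || pvNative m m2 then
      if pvErr m2 then coreF rest else m :: m2 :: coreF rest
    else m :: coreF (m2 :: rest)

theorem pvFailedPair_eq (m m2 : List (String × String)) :
    pvFailedPair m m2 = ((pvReact m m2 || pvNative m m2) && pvErr m2) := by
  unfold pvFailedPair pvReact pvNative
  cases pvRole m == some "assistant" <;> simp [Bool.and_assoc]

-- a message that closes a pair (role "user" or "tool") never starts one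
theorem second_not_pair {m m2 : List (String × String)}
    (h : (pvReact m m2 || pvNative m m2) = true) (x : List (String × String)) :
    (pvReact m2 x || pvNative m2 x) = false := by
  have hrole : pvRole m2 = some "user" ∨ pvRole m2 = some "tool" := by
    rcases Bool.or_eq_true_iff.1 h with h' | h'
    · unfold pvReact at h'
      simp only [Bool.and_eq_true, beq_iff_eq] at h'
      exact Or.inl h'.1.2
    · unfold pvNative at h'
      simp only [Bool.and_eq_true, beq_iff_eq] at h'
      exact Or.inr h'.2
  rcases hrole with h' | h' <;> simp [pvReact, pvNative, h']

theorem pruneLoopA_eq (s : List (List (String × String))) :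
    ∀ pruned, pruneLoopA pruned s = pruned ++ coreF s := by
  induction s using coreF.induct with
  | case1 => intro pruned; simp [pruneLoopA, coreF]
  | case2 m => intro pruned; simp [pruneLoopA, coreF]
  | case3 m m2 rest hp he ih =>
    intro pruned
    rcases Bool.or_eq_true_iff.1 hp with hr | hn
    · simp [pruneLoopA, coreF, hr, he, ih]
    · by_cases hr : pvReact m m2 = true <;>
        simp [pruneLoopA, coreF, hr, hn, he, ih]
  | case4 m m2 rest hp he ih =>
    intro pruned
    rcases Bool.or_eq_true_iff.1 hp with hr | hn
    · simp [pruneLoopA, coreF, hr, he, ih]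
    · by_cases hr : pvReact m m2 = true <;>
        simp [pruneLoopA, coreF, hr, hn, he, ih]
  | case5 m m2 rest hp ih =>
    intro pruned
    have hr : pvReact m m2 = false := by
      cases h : pvReact m m2 <;> simp [h] at hp ⊢
    have hn : pvNative m m2 = false := by
      cases h : pvNative m m2 <;> simp [h] at hp ⊢
    simp [pruneLoopA, coreF, hr, hn, ih]

-- badAtI s j = "a failed pair starts at index j of s" (false for j < 0 / out of range)
def badAtI : List (List (String × String)) → Int → Bool
  | m :: m2 :: rest, j => if j == 0 then pvFailedPair m m2 else badAtI (m2 :: rest) (j - 1)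
  | _, _ => false

def pvNear (s : List (List (String × String))) (i : Int) : Bool := badAtI s i || badAtI s (i - 1)

theorem badAtI_neg : ∀ (s : List (List (String × String))) (j : Int), j < 0 → badAtI s j = false := by
  intro s
  induction s with
  | nil => intro j _; rfl
  | cons m t ih =>
    intro j hj
    cases t with
    | nil => rfl
    | cons m2 r =>
      have h0 : (j == 0) = false := by simp; omega
      simp only [badAtI, h0]
      simp only [Bool.false_eq_true, if_false]
      exact ih (j - 1) (by omega)

theorem contains_foldl (l : List (Int × (List (String × String) × List (String × String))))
    (d : PySem.Set Int) (i : Int) :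
    PySem.Set.contains
      (l.foldl (fun d jp => if pvFailedPair jp.2.1 jp.2.2 then PySem.Set.add (PySem.Set.add d jp.1) (jp.1 + 1) else d) d) i
    = (PySem.Set.contains d i || l.any (fun jp => pvFailedPair jp.2.1 jp.2.2 && (i == jp.1 || i == jp.1 + 1))) := by
  induction l generalizing d with
  | nil => simp
  | cons jp t ih =>
    simp only [List.foldl_cons, List.any_cons]
    by_cases h : pvFailedPair jp.2.1 jp.2.2 = true
    · rw [if_pos h, ih]
      simp only [h, Bool.true_and, PySem.Set.contains_eq_decide, PySem.Set.mem_add]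
      by_cases hm : i ∈ d <;> by_cases h1 : i = jp.1 <;> by_cases h2 : i = jp.1 + 1 <;> simp [hm, h1, h2]
    · rw [if_neg h, ih]
      simp [Bool.eq_false_iff.2 h]

-- the list of adjacent pairs zip(body, body[1:]), in recursive form
def adjPairs : List (List (String × String)) → List (List (String × String) × List (String × String))
  | m :: m2 :: r => (m, m2) :: adjPairs (m2 :: r)
  | _ => []

theorem adjPairs_eq : ∀ s : List (List (String × String)), adjPairs s = s.zip (s.drop 1) := by
  intro s
  induction s using adjPairs.induct with
  | case1 m m2 r ih => simp [adjPairs, ih]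
  | case2 s h => cases s with
    | nil => rfl
    | cons m t => cases t with
      | nil => rfl
      | cons m2 r => exact absurd rfl (h m m2 r)

theorem any_enum_zip (s : List (List (String × String))) :
    ∀ (a i : Int),
    (PySem.List.enumerate (adjPairs s) a).any (fun jp => pvFailedPair jp.2.1 jp.2.2 && (i == jp.1 || i == jp.1 + 1))
    = (badAtI s (i - a) || badAtI s (i - a - 1)) := by
  induction s using adjPairs.induct with
  | case1 m m2 r ih =>
    intro a i
    simp only [adjPairs, PySem.List.enumerate_cons, List.any_cons]
    rw [ih (a + 1) i]
    by_cases hia : i = a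
    · have h0 : (i - a == (0:Int)) = true := by simp; omega
      simp only [badAtI, h0, if_pos]
      rw [badAtI_neg _ (i - (a+1)) (by omega), badAtI_neg _ (i - (a+1) - 1) (by omega),
        badAtI_neg _ (i - a - 1 - 1) (by omega)]
      have h1 : (i - a - 1 == (0:Int)) = false := by simp; omega
      simp [hia]
    · by_cases hia1 : i = a + 1
      · have h0 : (i - a == (0:Int)) = false := by simp; omega
        have h1 : (i - a - 1 == (0:Int)) = true := by simp; omega
        simp only [badAtI, h0, h1]
        simp only [Bool.false_eq_true, if_false, if_pos]
        have : i - (a + 1) = i - a - 1 := by omega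
        rw [this, badAtI_neg _ (i - a - 1 - 1) (by omega)]
        have hb : (i == a) = false := by simp; omega
        have hb1 : (i == a + 1) = true := by simp; omega
        cases pvFailedPair m m2 <;> cases badAtI (m2 :: r) (i - a - 1) <;> simp [hb, hb1]
      · have h0 : (i - a == (0:Int)) = false := by simp; omega
        have h1 : (i - a - 1 == (0:Int)) = false := by simp; omega
        simp only [badAtI, h0, h1]
        simp only [Bool.false_eq_true, if_false]
        have hb : (i == a) = false := by simp; omega
        have hb1 : (i == a + 1) = false := by simp; omega
        simp only [hb, hb1, Bool.or_self, Bool.and_false, Bool.false_or]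
        rw [show i - (a + 1) = i - a - 1 by omega]
  | case2 s h =>
    intro a i
    have hz : adjPairs s = [] := by
      cases s with
      | nil => rfl
      | cons m t => cases t with
        | nil => rfl
        | cons m2 r => exact absurd rfl (h m m2 r)
    have hb : ∀ j : Int, badAtI s j = false := by
      intro j
      cases s with
      | nil => rfl
      | cons m t => cases t with
        | nil => rfl
        | cons m2 r => exact absurd rfl (h m m2 r)
    simp [hz, hb]

theorem contains_dropSet (s : List (List (String × String))) (i : Int) :
    PySem.Set.contains (pvDropSet s) i = pvNear s i := by
  unfold pvDropSet pvNear
  rw [contains_foldl, ← adjPairs_eq, any_enum_zip s 0 i]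
  simp [PySem.Set.empty]

theorem pvFailedPair_false_of_second {m m2 : List (String × String)}
    (hp : (pvReact m m2 || pvNative m m2) = true) (x : List (String × String)) :
    pvFailedPair m2 x = false := by
  rw [pvFailedPair_eq, second_not_pair hp x]
  rfl

theorem badAtI_cons_zero_of_pair {m m2 : List (String × String)}
    (hp : (pvReact m m2 || pvNative m m2) = true)
    (rest : List (List (String × String))) : badAtI (m2 :: rest) 0 = false := by
  cases rest with
  | nil => rfl
  | cons r0 r' => simp [badAtI, pvFailedPair_false_of_second hp]

theorem pvNear_shift2 {m m2 : List (String × String)}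
    (hp : (pvReact m m2 || pvNative m m2) = true)
    (rest : List (List (String × String))) (j : Int) (hj : 0 ≤ j) :
    pvNear (m :: m2 :: rest) (j + 2) = pvNear rest j := by
  have h2 : (j + 2 == (0:Int)) = false := by simp; omega
  have h1 : (j + 2 - 1 == (0:Int)) = false := by simp; omega
  unfold pvNear
  simp only [badAtI, h2, h1]
  simp only [Bool.false_eq_true, if_false]
  have e2 : j + 1 - 1 = j := by omega
  rw [show j + 2 - 1 = j + 1 by omega, e2]
  cases rest with
  | nil =>
    have hb : ∀ k : Int, badAtI [m2] k = false := fun _ => rfl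
    have hb0 : ∀ k : Int, badAtI ([] : List (List (String × String))) k = false := fun _ => rfl
    simp [hb, hb0]
  | cons r0 r' =>
    have hk1 : (j + 1 == (0:Int)) = false := by simp; omega
    simp only [badAtI, hk1]
    simp only [Bool.false_eq_true, if_false]
    rw [e2]
    by_cases hj0 : j = 0
    · have ht : (j == (0:Int)) = true := by simp [hj0]
      simp only [ht, if_pos]
      rw [pvFailedPair_false_of_second hp r0, badAtI_neg _ (j - 1) (by omega)]
    · have ht : (j == (0:Int)) = false := by simp; omega
      simp only [ht]
      simp only [Bool.false_eq_true, if_false]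

theorem pvNear_shift1 {m m2 : List (String × String)}
    (hF : pvFailedPair m m2 = false)
    (rest : List (List (String × String))) (j : Int) (hj : 0 ≤ j) :
    pvNear (m :: m2 :: rest) (j + 1) = pvNear (m2 :: rest) j := by
  have h1 : (j + 1 == (0:Int)) = false := by simp; omega
  unfold pvNear
  simp only [badAtI, h1]
  simp only [Bool.false_eq_true, if_false]
  rw [show j + 1 - 1 = j by omega]
  by_cases hj0 : j = 0
  · have ht : (j == (0:Int)) = true := by simp [hj0]
    simp only [ht, if_pos, hF]
    rw [badAtI_neg _ (j - 1) (by omega)]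
  · have ht : (j == (0:Int)) = false := by simp; omega
    simp only [ht]
    simp only [Bool.false_eq_true, if_false]

theorem filt_enum (s : List (List (String × String))) :
    ∀ (a : Int) (p : Int → Bool),
    (∀ j : Int, 0 ≤ j → j < s.length → p (a + j) = !(pvNear s j)) →
    ((PySem.List.enumerate s a).filter (fun jm => p jm.1)).map (·.2) = coreF s := by
  induction s using coreF.induct with
  | case1 => intro a p _; simp [coreF]
  | case2 m =>
    intro a p h
    have h0 : p a = true := by
      have := h 0 le_rfl (by simp only [List.length_cons]; push_cast; omega)
      rw [add_zero] at this
      rw [this]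
      simp [pvNear, badAtI]
    simp [coreF, PySem.List.enumerate_cons, PySem.List.enumerate_nil, h0]
  | case3 m m2 rest hp he ih =>
    intro a p h
    have hF : pvFailedPair m m2 = true := by rw [pvFailedPair_eq, hp, he]; rfl
    have h0 : p a = false := by
      have := h 0 le_rfl (by simp only [List.length_cons]; push_cast; omega)
      rw [add_zero] at this
      rw [this]
      simp [pvNear, badAtI, hF]
    have h1 : p (a + 1) = false := by
      have := h 1 (by omega) (by simp only [List.length_cons]; push_cast; omega)
      rw [this]
      simp [pvNear, badAtI, hF]
    simp only [PySem.List.enumerate_cons, List.filter_cons, h0, h1]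
    simp only [Bool.false_eq_true, if_false]
    rw [coreF]
    simp [hp, he]
    exact ih (a + 1 + 1) p (by
      intro j hj hjl
      have := h (j + 2) (by omega) (by simp at hjl ⊢; omega)
      rw [show a + (j + 2) = a + 1 + 1 + j by ring] at this
      rw [this, pvNear_shift2 hp rest j hj])
  | case4 m m2 rest hp he ih =>
    intro a p h
    have he' : pvErr m2 = false := by cases hx : pvErr m2 <;> simp [hx] at he ⊢
    have hF : pvFailedPair m m2 = false := by rw [pvFailedPair_eq, hp, he']; rfl
    have h0 : p a = true := by
      have := h 0 le_rfl (by simp only [List.length_cons]; push_cast; omega)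
      rw [add_zero] at this
      rw [this]
      simp [pvNear, badAtI, hF, badAtI_neg (m2 :: rest) (-2) (by omega)]
    have h1 : p (a + 1) = true := by
      have := h 1 (by omega) (by simp only [List.length_cons]; push_cast; omega)
      rw [this]
      simp [pvNear, badAtI, hF, badAtI_cons_zero_of_pair hp rest]
    simp only [PySem.List.enumerate_cons, List.filter_cons, h0, h1]
    simp only [if_pos, List.map_cons]
    rw [coreF]
    simp [hp, he']
    exact ih (a + 1 + 1) p (by
      intro j hj hjl
      have := h (j + 2) (by omega) (by simp at hjl ⊢; omega)
      rw [show a + (j + 2) = a + 1 + 1 + j by ring] at this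
      rw [this, pvNear_shift2 hp rest j hj])
  | case5 m m2 rest hp ih =>
    intro a p h
    have hp' : (pvReact m m2 || pvNative m m2) = false := by
      cases hx : (pvReact m m2 || pvNative m m2) <;> simp [hx] at hp ⊢
    have hF : pvFailedPair m m2 = false := by rw [pvFailedPair_eq, hp']; rfl
    have h0 : p a = true := by
      have := h 0 le_rfl (by simp only [List.length_cons]; push_cast; omega)
      rw [add_zero] at this
      rw [this]
      simp [pvNear, badAtI, hF, badAtI_neg (m2 :: rest) (-2) (by omega)]
    simp only [PySem.List.enumerate_cons, List.filter_cons, h0]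
    simp only [if_pos, List.map_cons]
    rw [coreF]
    simp only [hp', Bool.false_eq_true, if_false]
    have := ih (a + 1) p (by
      intro j hj hjl
      have hh := h (j + 1) (by omega) (by simp at hjl ⊢; omega)
      rw [show a + (j + 1) = a + 1 + j by ring] at hh
      rw [hh, pvNear_shift1 hF rest j hj])
    rw [PySem.List.enumerate_cons, List.filter_cons] at this
    rw [this]

-- ===== VERDICT (by name: the statement is the Claim_ definition above) =====
theorem prune_failed_tool_turns_py_spec : Claim_equal_prune_failed_tool_turns_py := by
  intro messages _
  unfold Spec_prune_failed_tool_turns_py prune_failed_tool_turns_py prune_failed_tool_turns_py_alt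
  by_cases h : messages.length ≤ 2
  · simp [h]
  · simp only [h, if_false]
    rw [pruneLoopA_eq]
    congr 1
    have hc : (fun jm : Int × List (String × String) => !(PySem.Set.contains (pvDropSet (messages.drop 2)) jm.1))
        = (fun jm => !(pvNear (messages.drop 2) jm.1)) := by
      funext jm; rw [contains_dropSet]
    rw [hc]
    exact (filt_enum (messages.drop 2) 0 (fun i => !(pvNear (messages.drop 2) i))
      (by intro j _ _; simp)).symm
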